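/- GENERATED by mk_final_copies.py from the proof of the farm's unit `start_decoder.R10b` (farm:start_decoder.R10b.1: Proof.lean) as the
   re-elaboration sweep compiled it — do not edit. -/
import Asan.CheckWalk
import Vorbis.Spec.Reader
import Vorbis.Spec.Units.start_decoder_R10b

open X86 X86.User Asan Vorbis Vorbis.Spec Vorbis.Spec.StartDecoder

set_option maxRecDepth 4000
set_option maxHeartbeats 4000000

namespace Vorbis.Spec.start_decoder_R10b

/-- The signed value of the loop counter in r13d (`k ≤ 16`), as the walker's branch hypothesis spells it. -/
theorem cnt_toInt_small (k : Nat) (h : k ≤ 16) : (Word.part Width.w32 (addr k)).toInt = (k : Int) := by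
  rw [part32_toInt, toNat_addr _ (by omega)]
  unfold sint32
  have e : k % 2 ^ 32 = k := Nat.mod_eq_of_lt (by omega)
  rw [e]
  split <;> omega

/-- The signed value of `movzx eax, WORD PTR [rbx]` for a small `coupling_steps`. -/
theorem zext16_toInt_small (S : Nat) (h : S ≤ 16) : (BitVec.zeroExtend 32 (BitVec.ofNat 16 S)).toInt = (S : Int) := by
  have h1 : (BitVec.zeroExtend 32 (BitVec.ofNat 16 S)).toNat = S := by
    simp only [BitVec.toNat_setWidth, BitVec.toNat_ofNat, BitVec.zeroExtend]
    omega
  rw [BitVec.toInt_eq_toNat_cond, h1]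
  split <;> omega

/-- **Segment R10b of `start_decoder`** (the head `cut296` 0x116351 … 0x116357, then 0x116233 … 0x116243, returns into `cut290`
0x116248; = the farm worker's `part1` of start_decoder.R10 on the tree's carry layer): the loop test `movzx eax, word [rbx] ; cmp eax,
r13d ; jg` (no check call: the record is inside the image's data space), `k ≥ coupling_steps`: R11 with MP4 complete (`R10.toR11`);
else `ilog(f->channels − 1)` (its value ≤ 31 from `Log2_4In`, kept over the pushed return address) and `get_bits(f, that)`. The loop
record by `MapLoop.carry`, the record under construction by `MapCur.carry` (stage 10: nothing about the `chan` bytes), the finished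
steps from the `chan` bytes (no window of a reader call meets the arena's buffer). -/
theorem segR10b_walk {Lay : Layout} (hLay : Lay.hi = 0x1000000) {μ : Microarch} (hμ : UserX.MicroOK μ) {u₀ : State}
    (hcode : HasCodeNat Lay u₀ Vorbis.L.start_decoder.entry Vorbis.Code.code_start_decoder.nat Vorbis.L.start_decoder.size)
    (h_ilog : ∀ (others : List Obj) (frames : List (Nat × FrameLayout)),
      Calls Lay μ Vorbis.WayInv (Vorbis.conv u₀) Vorbis.L.ilog.entry (Vorbis.Spec.ilog.spec others frames))
    (h_get_bits : ∀ (others : List Obj) (frames : List (Nat × FrameLayout)) (Blk : Block → Prop) (len : Nat),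
      Calls Lay μ Vorbis.WayInv (Vorbis.conv u₀) Vorbis.L.get_bits.entry (Vorbis.Spec.get_bits.spec others frames Blk len))
    {g : Ghost} {i k : Nat} {v : State} {A7 A7c Ai : Arena} {A : Arena × List Obj}
    (hpt : InR10 u₀ g Vorbis.L.start_decoder.cut296 i k A7 A7c Ai A v) :
    ReachVia Lay μ WayInv v (fun w => AtR11 u₀ g i w ∨ AtR10b u₀ g i k w) := by
  have hl := hpt.loop
  have hcur := hpt.cur
  have hfr := hl.frame
  have hh := hl.hand
  have hm := hl.mid
  have hp : Pos g A := hl.secPt.pos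
  have he := hfr.entry
  v_entry he
  obtain ⟨hRa, hR8⟩ := hfr.r_eq
  simp only [steady, Ghost.RA] at hRa
  simp only [depth] at he_room he_stack
  have hflo := hp.f_lo
  have hf2 := hp.f_hi
  have hf3 := hp.f_stack
  simp only [Ghost.RA] at hf3
  have hRn : (addr g.R).toNat = g.R := toNat_addr _ (by omega)
  have hfn : (addr g.f).toNat = g.f := toNat_addr _ (by omega)
  -- the record `m(i)` lies in the mapping table, inside the arena's buffer
  obtain ⟨_, hT1, hT2⟩ := hl.table
  have h1 := hl.maps.MP1
  have hlt := hcur.lt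
  have p9 := hp.ar_lo
  have p10 := hp.ar_hi
  have p11 := hp.ar_stack
  have p7 := hp.objOut
  have em : mapAt g v.mem i = stb_vorbis.mapping v.mem g.f + 56 * i := rfl
  have hsteps := hcur.MP4_steps
  have hhd := hm.header.HD1
  have hkle := hpt.k_le
  have r_steps : v.mem.readLE (addr (mapAt g v.mem i)) 2 = Mapping.coupling_steps v.mem (mapAt g v.mem i) := by
    simp only [vacc, voff, Mem.u16, Nat.add_zero]
  obtain ⟨m, hmdef⟩ : ∃ m, mapAt g v.mem i = m := ⟨_, rfl⟩
  rw [hmdef] at em r_steps hsteps hkle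
  obtain ⟨S, hSdef⟩ : ∃ S, Mapping.coupling_steps v.mem m = S := ⟨_, rfl⟩
  rw [hSdef] at r_steps hsteps hkle
  have hmn : (addr m).toNat = m := toNat_addr _ (by omega)
  have hasM : Lay.Has (addr m) 56 := by
    apply has_addr Lay _ _ (by omega)
    · unfold Layout.lo
      omega
    · rw [hLay]
      omega
  have hasF : Lay.Has (addr g.f) 1808 := by
    apply has_addr Lay _ _ (by omega)
    · unfold Layout.lo
      omega
    · rw [hLay]
      omega
  have w_rip := hfr.rip
  have c_rsp := hfr.rsp
  have c_rbp := hl.rbp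
  have c_rbx : v.reg .rbx = addr m := by
    rw [← hmdef]
    exact hpt.rbx
  have c_r13 := hpt.r13
  have w_eq : Mem.EqOn Vorbis.L.textLo Vorbis.L.textHi u₀.mem v.mem := hfr.code
  have hdf : v.flags .df = false := (show abiInv _ from hfr.inv).1
  have hmx : v.mxcsr &&& 0x1F80 = 0x1F80 := (show abiInv _ from hfr.inv).2
  have hsse := Vorbis.sseOK_of_abiInv hfr.inv
  have hilog := h_ilog A.2 g.frames'
  have hgb := h_get_bits A.2 g.frames' (g.Blk A) g.len
  u_walk hcode [hμ.vendor] until [Vorbis.L.start_decoder.cut290, Vorbis.L.start_decoder.cut297] span [Vorbis.L.textLo, Vorbis.L.textHi] side (v_side)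
  case call_inv => v_inv
  case pre_116239 =>
    have hun : ShadowUntouched v.mem s_116239.mem := by v_untouched
    exact ⟨shadowPre_call hfr (by rw [w_rsp]; u_omega) hun, hh.g_log2⟩
  · -- after `ilog` (0x11623e)
    v_after_call w_rsp_116239 w_mem_116239
    have hs1 : Mem.SameExcept [⟨g.R - 408, g.R⟩] v.mem s_116239.mem := by u_same
    have hlog : Log2_4In s_116239.mem := by
      apply hfr.sh7.of_eqOn
      apply hs1.eqOn
      intro w hw
      rw [List.mem_singleton.mp hw]
      simp only []
      omega
    -- the result of ilog: at most 31
    obtain ⟨z, w_rax⟩ : ∃ z, s_116239r.reg .rax = z := ⟨_, rfl⟩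
    have hz : z.toNat ≤ 31 := by
      have hpz := w_post.2.2 hlog
      rw [w_rax] at hpz
      rw [hpz]
      apply ilogVal_le_of_lt
      · have := (Word.part .w32 (s_116239.reg .rdi)).toInt_lt
        simpa using this
      · have := (Word.part .w32 (s_116239.reg .rdi)).toInt_lt
        simpa using this
    clear w_post
    u_walk hcode [hμ.vendor] until [Vorbis.L.start_decoder.cut290, Vorbis.L.start_decoder.cut297] span [Vorbis.L.textLo, Vorbis.L.textHi] side (v_side)
    case call_inv => v_inv
    case pre_116243 =>
      have hun : ShadowUntouched v.mem s_116243.mem := by v_untouched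
      have hs2 : Mem.SameExcept [⟨g.R - 408, g.R⟩] v.mem s_116243.mem := by u_same
      have hbits : Bits (g.Blk A) g.len s_116243.mem g.f := by
        apply bits_kept hp hm.bits hs2
        intro w hw
        rw [List.mem_singleton.mp hw]
        left
        simp only []
        omega
      refine ⟨⟨shadowPre_call hfr (by rw [w_rsp]; u_omega) hun, ?_, ?_⟩, ?_⟩
      · rw [w_rdi, hfn]
        exact readerEnv_mid hh hm
      · rw [w_rdi, hfn]
        exact hbits
      · rw [bitsArg_def, w_rsi, Vorbis.toNat_ofBV32, Vorbis.toNat_part32]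
        omega
    -- the returned state (0x116248)
    v_after_call w_rsp_116243 w_mem_116243
    simp only [w_rdi_116243, hfn] at w_same
    have hs : Mem.SameExcept [⟨g.R - 408, g.R⟩, ⟨g.f + 48, g.f + 56⟩, ⟨g.f + 84, g.f + 96⟩, ⟨g.f + 136, g.f + 144⟩,
        ⟨g.f + 1484, g.f + 1749⟩, ⟨g.f + 1752, g.f + 1784⟩] v.mem s_116243r.mem := by
      u_same
    have hws : ∀ w, w ∈ [(⟨g.R - 408, g.R⟩ : Span), ⟨g.f + 48, g.f + 56⟩, ⟨g.f + 84, g.f + 96⟩, ⟨g.f + 136, g.f + 144⟩,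
        ⟨g.f + 1484, g.f + 1749⟩, ⟨g.f + 1752, g.f + 1784⟩] → MapWin g Ai A (mapAt g v.mem i) w := by
      intro w hw
      simp only [List.mem_cons, List.mem_nil_iff, or_false] at hw
      unfold MapWin
      rcases hw with rfl | rfl | rfl | rfl | rfl | rfl
      · left
        simp only []
        omega
      · right; right; right; right; left
        simp only []
        omega
      · right; right; right; right; left
        simp only []
        omega
      · right; right; right; right; right; left
        simp only []
        omega
      · right; right; right; right; right; right; left
        simp only []
        omega
      · right; right; right; right; right; right; right; left
        simp only []
        omega
    have hpost : GetBitsSpecPost (g.Blk A) g.len (s_116243.reg .rdi).toNat (bitsArg s_116243) s_116243 s_116243r := w_post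
    rw [w_rdi_116243, hfn] at hpost
    have hun : ShadowUntouched v.mem s_116243r.mem := by v_untouched
    have hl' : MapLoop u₀ g Vorbis.L.start_decoder.cut290 i A7 A7c Ai A s_116243r :=
      hl.carry hcur.lt hs hun hws hpost.bits.bits w_rip w_rsp (Vorbis.conv_code_eqOn w_code) w_inv
        (by rw [w_kept.get .rbp rfl])
    obtain ⟨ecount, _, emap, echn, _⟩ := hl.fields_eq hcur.lt hs hws
    -- no window of a reader call meets the arena's buffer: every range inside it reads the same
    have harena : ∀ lo hi : Nat, A.1.B ≤ lo → hi ≤ A.1.B + A.1.L → Mem.EqOn lo hi v.mem s_116243r.mem := by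
      intro lo hi q1 q2
      apply hs.eqOn
      intro w hw
      simp only [List.mem_cons, List.mem_nil_iff, or_false] at hw
      rcases hw with rfl | rfl | rfl | rfl | rfl | rfl <;> simp only [] <;> omega
    have hrec : Mem.EqOn (mapAt g v.mem i) (mapAt g v.mem i + 56) v.mem s_116243r.mem := by
      rw [hmdef]
      exact harena _ _ (by omega) (by omega)
    have hcur' : MapCur g (Since Ai A.1) s_116243r.mem i 10 :=
      hcur.carry ecount emap echn (hrec.mono (Nat.le_refl _) (by omega)) (by rw [hmdef]; omega)
        (fun h11 => absurd h11 (by omega))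
    have e_steps : Mapping.coupling_steps s_116243r.mem (mapAt g v.mem i) = Mapping.coupling_steps v.mem (mapAt g v.mem i) := by
      simp only [vacc, voff]
      exact hrec.u16 _ (by omega) (by rw [hmdef]; omega) (by rw [hmdef]; omega)
    have e_chan : Mapping.chan s_116243r.mem (mapAt g v.mem i) = Mapping.chan v.mem (mapAt g v.mem i) := by
      simp only [vacc, voff]
      exact hrec.u64 _ (by omega) (by rw [hmdef]; omega) (by rw [hmdef]; omega)
    -- the `chan` block lies inside the arena's buffer
    have hC : Since Ai A.1 ⟨Mapping.chan v.mem (mapAt g v.mem i), 3 * nchan v.mem g.f⟩ := hcur.MP2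
    have hCin := arena_inside hm.arena hC.1
    simp only [] at hCin
    rw [hmdef] at hCin
    have hnc := nchan_def v.mem g.f
    have hchanEq : Mem.EqOn (Mapping.chan v.mem m) (Mapping.chan v.mem m + 3 * nchan v.mem g.f) v.mem s_116243r.mem :=
      harena _ _ hCin.1 hCin.2
    have hk16 : k ≤ 16 := by omega
    have hS16 : S ≤ 16 := by omega
    have hkS : k < S := by
      rw [cnt_toInt_small k hk16, zext16_toInt_small S hS16] at hbr_116357
      omega
    have hdone : ∀ k' : Nat, k' < k → Mapping.CouplingOK s_116243r.mem g.f (mapAt g s_116243r.mem i) k' := by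
      intro k' hk'
      have hold := hpt.done k' hk'
      unfold Mapping.CouplingOK at hold ⊢
      rw [emap, echn]
      simp only [MappingChannel.magnitude, MappingChannel.angle, Mapping.chan_at, voff] at hold ⊢
      rw [hmdef] at hold e_chan ⊢
      rw [e_chan, hchanEq.u8 _ (by omega) (by omega) (by omega), hchanEq.u8 _ (by omega) (by omega) (by omega)]
      exact hold
    have hin : InR10 u₀ g Vorbis.L.start_decoder.cut290 i k A7 A7c Ai A s_116243r :=
      { loop := hl'
        rbx := by
          rw [emap, w_kept.get .rbx rfl, hmdef]
          exact c_rbx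
        cur := hcur'
        r13 := by
          rw [w_kept.get .r13 rfl]
          exact c_r13
        k_le := by
          rw [emap, e_steps, hmdef, hSdef]
          exact hkle
        done := hdone }
    refine ReachVia.done (Or.inr ⟨A7, A7c, Ai, A, hin, ?_⟩)
    rw [emap, e_steps, hmdef, hSdef]
    exact hkS
  · -- the exit arm: `k ≥ coupling_steps`, 0x11635d
    have hdf' : s_116357.flags .df = false := by
      rw [w_flags]
      simp only [X86.User.df_setStatus]
      exact hdf
    have hmx' : s_116357.mxcsr &&& 0x1F80 = 0x1F80 := by
      rw [w_mxcsr]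
      exact hmx
    have hs : Mem.SameExcept [] v.mem s_116357.mem := by
      rw [w_mem]
      exact Mem.SameExcept.refl _ _
    have hun : ShadowUntouched v.mem s_116357.mem := by
      rw [w_mem]
      exact fun _ _ _ => rfl
    have hrsp : s_116357.reg .rsp = addr g.R := by
      rw [w_kept.get .rsp rfl]
      exact c_rsp
    have hbits : Bits (g.Blk A) g.len s_116357.mem g.f := by
      rw [w_mem]
      exact hm.bits
    have hl' : MapLoop u₀ g pc_R11 i A7 A7c Ai A s_116357 :=
      hl.carry hcur.lt hs hun (fun x hx => absurd hx List.not_mem_nil) hbits w_rip hrsp w_eq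
        (Vorbis.abiInv_of hdf' hmx') (by rw [w_kept.get .rbp rfl])
    have hk16 : k ≤ 16 := by omega
    have hS16 : S ≤ 16 := by omega
    have hSk : S ≤ k := by
      rw [cnt_toInt_small k hk16, zext16_toInt_small S hS16] at hbr_116357
      omega
    have hin : InR10 u₀ g pc_R11 i k A7 A7c Ai A s_116357 :=
      { loop := hl'
        rbx := by
          rw [w_kept.get .rbx rfl, w_mem]
          exact hpt.rbx
        cur := by
          rw [w_mem]
          exact hcur
        r13 := by
          rw [w_kept.get .r13 rfl]
          exact c_r13
        k_le := by
          rw [w_mem]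
          exact hpt.k_le
        done := by
          rw [w_mem]
          exact hpt.done }
    refine ReachVia.done (Or.inl (R10.toR11 hin ?_))
    rw [w_mem, hmdef, hSdef]
    exact hSk

end Vorbis.Spec.start_decoder_R10b

/-- The unit `start_decoder.R10b`: `segR10b_walk` at every entry state. -/
theorem Vorbis.Spec.Worked.start_decoder_R10b_ok : Vorbis.Spec.start_decoder_R10b.Statement := by
  intro Lay hLay μ hμ u₀ hcode h_ilog h_get_bits g i k v hat
  obtain ⟨A7, A7c, Ai, A, hpt⟩ := hat
  exact Vorbis.Spec.start_decoder_R10b.segR10b_walk hLay hμ hcode h_ilog h_get_bits hpt
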